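-- pv_equiv track=rewrite | github.com/speelbreaker12/opus-trader | scripts/check_reconciliation_matrix.py | find_table
-- ===== SOURCE A (Python) =====
-- from typing import Dict, List, Set, Tuple
--
-- def find_table(lines: List[str]) -> Tuple[int, int]:
--     """Find the first markdown table whose header contains 'RM-ID'. Return (start_idx, end_idx) 0-based."""
--     for i, line in enumerate(lines):
--         if "RM-ID" in line and line.strip().startswith("|"):
--             end = i
--             k = i
--             while k < len(lines) and lines[k].strip().startswith("|"):
--                 end = k
--                 k += 1
--             return i, end
--     return -1, -1
-- ===== SOURCE B (Python) =====
-- from typing import List, Tuple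
--
--
-- def find_table(lines: List[str]) -> Tuple[int, int]:
--     """Find the first markdown table whose header contains 'RM-ID'. Return (start_idx, end_idx) 0-based."""
--     n = len(lines)
--     rows = [line.strip().startswith("|") for line in lines]
--     # backward pass: run_end[i] = last index of the contiguous block of row lines containing i (-1 if not a row)
--     rev = []
--     for i in range(n - 1, -1, -1):
--         if rows[i]:
--             e = rev[-1] if (i + 1 < n and rows[i + 1]) else i
--         else:
--             e = -1
--         rev.append(e)
--     run_end = rev[::-1]
--     for i, (line, r, e) in enumerate(zip(lines, rows, run_end)):
--         if "RM-ID" in line and r: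
--             return i, e
--     return -1, -1
-- ===== Notes on version B (the rewrite author's own statement) =====
-- stated objective: alternative
-- what changed: Replaces A's find-header-then-extend inner scan by two staged passes: a backward pass precomputing for every line the end index of its contiguous '|'-row block, then a single forward scan that returns the precomputed end at the first RM-ID header.
import Mathlib
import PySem

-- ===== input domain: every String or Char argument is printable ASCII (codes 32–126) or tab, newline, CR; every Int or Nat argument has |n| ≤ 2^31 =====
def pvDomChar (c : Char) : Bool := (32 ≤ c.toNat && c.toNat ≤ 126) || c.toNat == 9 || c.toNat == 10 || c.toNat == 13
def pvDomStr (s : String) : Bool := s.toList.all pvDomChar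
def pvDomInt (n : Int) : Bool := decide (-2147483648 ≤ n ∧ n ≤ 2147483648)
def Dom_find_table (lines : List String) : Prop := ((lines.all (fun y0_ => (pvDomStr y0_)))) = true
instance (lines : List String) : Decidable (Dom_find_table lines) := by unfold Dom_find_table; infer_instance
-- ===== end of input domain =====

-- B replaces A's header-then-inner-extension scan by two staged passes: a backward pass precomputing each line's row-block end, then one forward scan reading the table (alternative decomposition, same cost).


-- ===== PORT A =====
-- inner while loop of A: while k < len(lines) and lines[k].strip().startswith("|"): end = k; k += 1
def find_table_inner (lines : List String) (k : Nat) (e : Int) : Int :=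
  if h : k < lines.length then
    if PySem.Str.startswith (PySem.Str.strip lines[k]) "|" then
      find_table_inner lines (k + 1) (Int.ofNat k)
    else e
  else e
termination_by lines.length - k

-- outer for loop of A, over enumerate(lines)
def find_table_go (lines : List String) : List (Int × String) → Int × Int
  | [] => (-1, -1)
  | (i, line) :: rest =>
    if PySem.Str.isIn "RM-ID" line && PySem.Str.startswith (PySem.Str.strip line) "|" then
      (i, find_table_inner lines i.toNat i)
    else find_table_go lines rest

def find_table (lines : List String) : Int × Int :=
  find_table_go lines (PySem.List.enumerate lines)

-- ===== PORT B =====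
def is_row (line : String) : Bool := PySem.Str.startswith (PySem.Str.strip line) "|"

-- Source B's backward pass over range(n-1,-1,-1) building the run_end table back-to-front,
-- rendered as the structural recursion that constructs the list right-to-left:
-- the entry for index i reads the already-computed entry for i+1 (the head of the tail).
def buildRunEnd : List Bool → Int → List Int
  | [], _ => []
  | b :: rest, i =>
    let tail := buildRunEnd rest (i + 1)
    (if b then
      (match rest.head?, tail.head? with
       | some true, some e => e
       | _, _ => i)
     else -1) :: tail

-- Source B's final forward loop over enumerate(zip(lines, rows, run_end))
def searchB : List String → List Bool → List Int → Int → Int × Int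
  | l :: ls, b :: bs, e :: es, i =>
    if PySem.Str.isIn "RM-ID" l && b then (i, e) else searchB ls bs es (i + 1)
  | _, _, _, _ => (-1, -1)

def find_table_alt (lines : List String) : Int × Int :=
  let rows := lines.map is_row
  let runEnd := buildRunEnd rows 0
  searchB lines rows runEnd 0

-- ===== PRECONDITION & SPEC =====
def Spec_find_table (lines : List String) (out : Int × Int) : Prop := out = find_table_alt lines
instance (lines : List String) (out : Int × Int) : Decidable (Spec_find_table lines out) := by unfold Spec_find_table; infer_instance

-- ===== CLAIM (what is proved, stated in full; the proofs are below) =====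
def Claim_equal_find_table : Prop := ∀ (lines : List String), Dom_find_table lines → Spec_find_table lines (find_table lines)

-- ===== LEMMAS AND PROOFS =====

-- A's inner while computes the (clamped) last index of the row block starting at k.
theorem inner_eq_takeWhile (lines : List String) :
    ∀ (tail : List String) (k : Nat) (e : Int), lines.drop k = tail →
      find_table_inner lines k e =
        (if ((lines.drop k).takeWhile is_row).length = 0 then e
         else (k : Int) + ((lines.drop k).takeWhile is_row).length - 1) := by
  intro tail
  induction tail with
  | nil =>
    intro k e hdrop
    rw [hdrop]
    have hk : ¬ k < lines.length := by
      have := List.drop_eq_nil_iff.mp hdrop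
      omega
    unfold find_table_inner
    simp [hk]
  | cons h t ih =>
    intro k e hdrop
    have hk : k < lines.length := by
      by_contra hc
      rw [List.drop_eq_nil_iff.mpr (by omega)] at hdrop
      exact (List.cons_ne_nil h t) hdrop.symm
    have hget : lines[k]'hk = h := by
      have h0 : (lines.drop k)[0]? = some h := by rw [hdrop]; rfl
      rw [List.getElem?_drop, Nat.add_zero, List.getElem?_eq_getElem hk] at h0
      exact Option.some.inj h0
    have hdrop1 : lines.drop (k + 1) = t := by
      have : lines.drop (k + 1) = (lines.drop k).drop 1 := by
        rw [List.drop_drop]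
      simpa [hdrop] using this
    unfold find_table_inner
    rw [dif_pos hk, hget, hdrop]
    by_cases hrow : is_row h = true
    case pos =>
      rw [if_pos (by simpa [is_row] using hrow)]
      rw [ih (k + 1) (Int.ofNat k) hdrop1, hdrop1]
      simp only [List.takeWhile_cons, hrow, if_pos, List.length_cons]
      rcases Nat.eq_zero_or_pos (t.takeWhile is_row).length with h0 | hp
      · rw [if_pos h0, if_neg (by omega)]
        simp only [Int.ofNat_eq_natCast, h0]
        push_cast
        omega
      · rw [if_neg (by omega), if_neg (by omega)]
        push_cast
        omega
    case neg =>
      have hrow' : is_row h = false := by simpa using hrow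
      rw [if_neg (by simpa [is_row] using hrow)]
      rw [List.takeWhile_cons, hrow']
      simp

-- The outer loop of A against a find?-based characterisation, generalized over the suffix.
theorem go_eq (lines : List String) :
    ∀ (tail : List String) (s : Nat), lines.drop s = tail →
      find_table_go lines (PySem.List.enumerate tail (s : Int)) =
        (match (PySem.List.enumerate tail (s : Int)).find?
            (fun p => PySem.Str.isIn "RM-ID" p.2 && is_row p.2) with
         | none => (-1, -1)
         | some p => (p.1, p.1 + ((lines.drop p.1.toNat).takeWhile is_row).length - 1)) := by
  intro tail
  induction tail with
  | nil => intro s _; simp [PySem.List.enumerate_nil, find_table_go]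
  | cons h t ih =>
    intro s hdrop
    have hdrop1 : lines.drop (s + 1) = t := by
      have : lines.drop (s + 1) = (lines.drop s).drop 1 := by rw [List.drop_drop]
      simpa [hdrop] using this
    rw [PySem.List.enumerate_cons]
    by_cases hc : (PySem.Str.isIn "RM-ID" h && is_row h) = true
    case pos =>
      have hrow : is_row h = true := by
        simp only [Bool.and_eq_true] at hc
        exact hc.2
      rw [List.find?_cons_of_pos (h := by simpa using hc)]
      simp only [find_table_go, is_row] at hc ⊢
      rw [if_pos hc]
      have htoNat : (s : Int).toNat = s := by simp
      rw [inner_eq_takeWhile lines (lines.drop ((s : Int)).toNat) ((s : Int)).toNat ((s : Int)) rfl]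
      have hne : ((lines.drop ((s : Int)).toNat).takeWhile is_row).length ≠ 0 := by
        rw [htoNat, hdrop]
        simp [hrow]
      rw [if_neg hne]
      simp [htoNat]
    case neg =>
      rw [List.find?_cons_of_neg (h := by simpa using hc)]
      simp only [find_table_go]
      rw [if_neg (by simpa [is_row] using hc)]
      have := ih (s + 1) hdrop1
      push_cast at this ⊢
      exact this

-- The head of the run-end table, when the first line is a row, is i + length of the row block - 1.
theorem buildRunEnd_head :
    ∀ (rest : List Bool) (i : Int),
      (buildRunEnd (true :: rest) i).head? = some (i + ((true :: rest).takeWhile id).length - 1) := by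
  intro rest
  induction rest with
  | nil => intro i; simp [buildRunEnd]
  | cons b2 r2 ih =>
    intro i
    cases b2 with
    | false => simp [buildRunEnd]
    | true =>
      have htail := ih (i + 1)
      simp only [buildRunEnd, List.head?_cons] at htail ⊢
      rw [Option.some.inj htail]
      simp only [List.takeWhile_cons, id, if_pos, List.length_cons, Option.some.injEq]
      push_cast
      ring

-- B's forward scan against the same find?-based characterisation.
theorem searchB_eq (lines : List String) :
    ∀ (tail : List String) (s : Nat), lines.drop s = tail →
      searchB tail (tail.map is_row) (buildRunEnd (tail.map is_row) (s : Int)) (s : Int) =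
        (match (PySem.List.enumerate tail (s : Int)).find?
            (fun p => PySem.Str.isIn "RM-ID" p.2 && is_row p.2) with
         | none => (-1, -1)
         | some p => (p.1, p.1 + ((lines.drop p.1.toNat).takeWhile is_row).length - 1)) := by
  intro tail
  induction tail with
  | nil => intro s _; simp [PySem.List.enumerate_nil, searchB]
  | cons h t ih =>
    intro s hdrop
    have hdrop1 : lines.drop (s + 1) = t := by
      have : lines.drop (s + 1) = (lines.drop s).drop 1 := by rw [List.drop_drop]
      simpa [hdrop] using this
    rw [PySem.List.enumerate_cons]
    by_cases hc : (PySem.Str.isIn "RM-ID" h && is_row h) = true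
    case pos =>
      have hrow : is_row h = true := by
        simp only [Bool.and_eq_true] at hc
        exact hc.2
      rw [List.find?_cons_of_pos (h := by simpa using hc)]
      have hmap : (h :: t).map is_row = true :: t.map is_row := by simp [hrow]
      rw [hmap]
      have hcur : (buildRunEnd (true :: t.map is_row) (s : Int)).head? =
          some ((s : Int) + ((true :: t.map is_row).takeWhile id).length - 1) :=
        buildRunEnd_head _ _
      obtain ⟨e, tl, hbe⟩ : ∃ e tl, buildRunEnd (true :: t.map is_row) (s : Int) = e :: tl :=
        ⟨_, _, rfl⟩
      rw [hbe] at hcur ⊢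
      simp only [List.head?_cons, Option.some.injEq] at hcur
      simp only [searchB]
      rw [if_pos (by simpa [hrow] using hc), hcur]
      have htw : ((true :: t.map is_row).takeWhile id) = ((h :: t).takeWhile is_row).map is_row := by
        have : (true :: t.map is_row) = (h :: t).map is_row := by simp [hrow]
        rw [this, List.takeWhile_map]
        congr 1
      have htoNat : (s : Int).toNat = s := by simp
      rw [htoNat, hdrop, htw, List.length_map]
    case neg =>
      rw [List.find?_cons_of_neg (h := by simpa using hc)]
      have hrowcase : is_row h = true ∨ is_row h = false := by
        cases is_row h <;> simp
      have hstep :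
          searchB (h :: t) ((h :: t).map is_row) (buildRunEnd ((h :: t).map is_row) (s : Int)) (s : Int) =
            searchB t (t.map is_row) (buildRunEnd (t.map is_row) ((s : Int) + 1)) ((s : Int) + 1) := by
        simp only [List.map_cons, buildRunEnd, searchB]
        rw [if_neg hc]
      rw [hstep]
      have := ih (s + 1) hdrop1
      push_cast at this ⊢
      exact this

-- ===== VERDICT (by name: the statement is the Claim_ definition above) =====
theorem find_table_spec : Claim_equal_find_table := by
  intro lines _
  unfold Spec_find_table find_table find_table_alt
  have hA := go_eq lines lines 0 (by simp)
  have hB := searchB_eq lines lines 0 (by simp)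
  simp only [Nat.cast_zero] at hA hB
  rw [hA, ← hB]
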